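-- pv_equiv track=rewrite | github.com/bigCH7/financial-analysis-bot | analysis_longterm.py | recovery_days_after_drawdown
-- ===== SOURCE A (Python) =====
-- def recovery_days_after_drawdown(prices):
--     if not prices or len(prices) < 3:
--         return None
--     peak = prices[0]
--     peak_idx = 0
--     trough_idx = 0
--     trough_price = prices[0]
--
--     for idx, price in enumerate(prices):
--         if price > peak:
--             peak = price
--             peak_idx = idx
--             trough_idx = idx
--             trough_price = price
--         if price < trough_price:
--             trough_price = price
--             trough_idx = idx
--
--     if trough_idx <= peak_idx:
--         return None
--
--     for idx in range(trough_idx, len(prices)):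
--         if prices[idx] >= peak:
--             return idx - trough_idx
--     return None
-- ===== SOURCE B (Python) =====
-- def recovery_days_after_drawdown(prices):
--     if len(prices) < 3:
--         return None
--     peak = max(prices)
--     peak_idx = prices.index(peak)
--     tail = prices[peak_idx:]
--     trough_idx = peak_idx + tail.index(min(tail))
--     if trough_idx <= peak_idx:
--         return None
--     rest = prices[trough_idx:]
--     if peak in rest:
--         return rest.index(peak)
--     return None
-- ===== Notes on version B (the rewrite author's own statement) =====
-- stated objective: idiomatic
-- what changed: Replaces A's single interleaved peak/trough state-machine pass and its explicit forward recovery scan by a loop-free composition of builtins: peak = max(prices), peak_idx = prices.index(peak), trough via min/index on the suffix, and the recovery day via index of peak in the suffix after the trough (using that >= peak equals == peak for the global maximum).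
import Mathlib
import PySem

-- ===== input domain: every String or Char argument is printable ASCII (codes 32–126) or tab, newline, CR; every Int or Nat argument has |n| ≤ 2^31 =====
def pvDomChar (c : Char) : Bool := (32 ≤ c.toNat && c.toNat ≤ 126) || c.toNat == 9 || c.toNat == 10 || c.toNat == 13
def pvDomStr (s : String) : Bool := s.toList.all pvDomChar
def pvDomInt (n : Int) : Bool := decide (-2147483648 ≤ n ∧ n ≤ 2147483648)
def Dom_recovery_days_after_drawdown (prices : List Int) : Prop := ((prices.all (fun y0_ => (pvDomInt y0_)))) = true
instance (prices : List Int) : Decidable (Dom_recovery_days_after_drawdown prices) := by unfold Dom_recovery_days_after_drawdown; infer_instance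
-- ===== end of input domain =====

-- B is an idiomatic, loop-free recomposition (max/index/min over slices) of A's single interleaved pass; same values everywhere.

-- ===== PORT A =====
-- loop body of A's first for-loop; state = (peak, peak_idx, trough_idx, trough_price)
def stepA (s : Int × Int × Int × Int) (ip : Int × Int) : Int × Int × Int × Int :=
  let s1 := if ip.2 > s.1 then (ip.2, ip.1, ip.1, ip.2) else s
  if ip.2 < s1.2.2.2 then (s1.1, s1.2.1, ip.1, ip.2) else s1

def recovery_days_after_drawdown (prices : List Int) : Option Int :=
  if prices = [] ∨ prices.length < 3 then none
  else
    match prices with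
    | [] => none
    | p0 :: _ =>
      let st := (PySem.List.enumerate prices 0).foldl stepA (p0, 0, 0, p0)
      if st.2.2.1 ≤ st.2.1 then none
      else
        match (PySem.List.pyRange st.2.2.1 (prices.length : Int) 1).find?
              (fun idx => decide (PySem.List.pyGetD prices idx 0 ≥ st.1)) with
        | some idx => some (idx - st.2.2.1)
        | none => none

-- ===== PORT B =====
def recovery_days_after_drawdown_alt (prices : List Int) : Option Int :=
  if prices.length < 3 then none
  else
    match PySem.List.max? prices (fun x => x) with
    | none => none
    | some peak =>
      match PySem.List.index? prices peak with
      | none => none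
      | some peakIdx =>
        let tail := PySem.List.slice prices (some (peakIdx : Int)) none
        match PySem.List.min? tail (fun x => x) with
        | none => none
        | some trough =>
          match PySem.List.index? tail trough with
          | none => none
          | some tIn =>
            let troughIdx : Int := (peakIdx : Int) + (tIn : Int)
            if troughIdx ≤ (peakIdx : Int) then none
            else
              match PySem.List.index? (PySem.List.slice prices (some troughIdx) none) peak with
              | none => none
              | some r => some (r : Int)

-- ===== PRECONDITION & SPEC =====
def Spec_recovery_days_after_drawdown (prices : List Int) (out : Option Int) : Prop := out = recovery_days_after_drawdown_alt prices
instance (prices : List Int) (out : Option Int) : Decidable (Spec_recovery_days_after_drawdown prices out) := by unfold Spec_recovery_days_after_drawdown; infer_instance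

-- ===== CLAIM (what is proved, stated in full; the proofs are below) =====
def Claim_equal_recovery_days_after_drawdown : Prop := ∀ (prices : List Int), Dom_recovery_days_after_drawdown prices → Spec_recovery_days_after_drawdown prices (recovery_days_after_drawdown prices)

-- ===== LEMMAS AND PROOFS =====

-- characterisation of the state of A's first loop
def AInv (l : List Int) (M : Int) (P T : Nat) (t : Int) : Prop :=
  P < l.length ∧ T < l.length ∧ P ≤ T ∧
  (∀ i : Nat, (h : i < l.length) → l[i] ≤ M) ∧
  (∃ h : P < l.length, l[P] = M) ∧
  (∀ i : Nat, (h : i < l.length) → i < P → l[i] < M) ∧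
  (∃ h : T < l.length, l[T] = t) ∧
  (∀ i : Nat, (h : i < l.length) → P ≤ i → t ≤ l[i]) ∧
  (∀ i : Nat, (h : i < l.length) → P ≤ i → i < T → t < l[i])

lemma getElem_snoc {l : List Int} {x : Int} {i : Nat} (h : i < (l ++ [x]).length) :
    (l ++ [x])[i] = if hi : i < l.length then l[i] else x := by
  by_cases hi : i < l.length
  · simp [List.getElem_append_left hi, hi]
  · have hi' : i = l.length := by simp at h; omega
    subst hi'; simp

lemma getElem_snoc_self {l : List Int} {x : Int} :
    (l ++ [x])[l.length]'(by simp) = x := by simp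

lemma fold_spec (p0 : Int) (rest : List Int) :
    ∃ (M t : Int) (P T : Nat),
      (PySem.List.enumerate (p0 :: rest) 0).foldl stepA (p0, 0, 0, p0) = (M, (P : Int), (T : Int), t)
      ∧ AInv (p0 :: rest) M P T t := by
  induction rest using List.reverseRecOn with
  | nil =>
    refine ⟨p0, p0, 0, 0, ?_, ?_⟩
    · simp [PySem.List.enumerate_cons, PySem.List.enumerate_nil, stepA]
    · refine ⟨by simp, by simp, le_refl _, ?_, ⟨by simp, rfl⟩, ?_, ⟨by simp, rfl⟩, ?_, ?_⟩
      · intro i h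
        have : i = 0 := by simp at h; omega
        subst this; simp
      · intro i h hi; omega
      · intro i h hle
        have : i = 0 := by simp at h; omega
        subst this; simp
      · intro i h hle hlt; omega
  | append_singleton rest x ih =>
    obtain ⟨M, t, P, T, hfold, hinv⟩ := ih
    obtain ⟨hP, hT, hPT, hmax, ⟨_, hPval⟩, hfirst, ⟨_, hTval⟩, hmin, hminfirst⟩ := hinv
    have hcons : p0 :: (rest ++ [x]) = (p0 :: rest) ++ [x] := rfl
    rw [hcons]
    rw [PySem.List.enumerate_append, List.foldl_append, hfold]
    simp only [PySem.List.enumerate_cons, PySem.List.enumerate_nil, List.foldl_cons,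
      List.foldl_nil, zero_add]
    by_cases hx : x > M
    · refine ⟨x, x, (p0 :: rest).length, (p0 :: rest).length, by simp [stepA, hx], ?_⟩
      refine ⟨by simp, by simp, le_refl _, ?_, ⟨by simp, getElem_snoc_self⟩, ?_,
        ⟨by simp, getElem_snoc_self⟩, ?_, ?_⟩
      · intro i h; rw [getElem_snoc h]; split_ifs with hj
        · exact le_of_lt ((hmax i hj).trans_lt hx)
        · exact le_refl x
      · intro i h hi; rw [getElem_snoc h, dif_pos hi]; exact (hmax i hi).trans_lt hx
      · intro i h hle; rw [getElem_snoc h]; split_ifs with hj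
        · omega
        · exact le_refl x
      · intro i h hle hlt; omega
    · by_cases hx2 : x < t
      · refine ⟨M, x, P, (p0 :: rest).length, by simp [stepA, hx, hx2], ?_⟩
        refine ⟨by have h1 := hP; have h2 := hT; simp at h1 h2 ⊢; omega, by simp, le_of_lt hP, ?_,
          ⟨by have h1 := hP; have h2 := hT; simp at h1 h2 ⊢; omega, by rw [getElem_snoc (by have h1 := hP; have h2 := hT; simp at h1 h2 ⊢; omega), dif_pos hP]; exact hPval⟩, ?_,
          ⟨by simp, getElem_snoc_self⟩, ?_, ?_⟩
        · intro i h; rw [getElem_snoc h]; split_ifs with hj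
          · exact hmax i hj
          · exact not_lt.mp hx
        · intro i h hi; rw [getElem_snoc h, dif_pos (hi.trans hP)]; exact hfirst i (hi.trans hP) hi
        · intro i h hle; rw [getElem_snoc h]; split_ifs with hj
          · exact le_of_lt (hx2.trans_le (hmin i hj hle))
          · exact le_refl x
        · intro i h hle hlt; rw [getElem_snoc h, dif_pos hlt]; exact hx2.trans_le (hmin i hlt hle)
      · refine ⟨M, t, P, T, by simp [stepA, hx, hx2], ?_⟩
        refine ⟨by have h1 := hP; have h2 := hT; simp at h1 h2 ⊢; omega, by have h1 := hP; have h2 := hT; simp at h1 h2 ⊢; omega, hPT, ?_,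
          ⟨by have h1 := hP; have h2 := hT; simp at h1 h2 ⊢; omega, by rw [getElem_snoc (by have h1 := hP; have h2 := hT; simp at h1 h2 ⊢; omega), dif_pos hP]; exact hPval⟩, ?_,
          ⟨by have h1 := hP; have h2 := hT; simp at h1 h2 ⊢; omega, by rw [getElem_snoc (by have h1 := hP; have h2 := hT; simp at h1 h2 ⊢; omega), dif_pos hT]; exact hTval⟩, ?_, ?_⟩
        · intro i h; rw [getElem_snoc h]; split_ifs with hj
          · exact hmax i hj
          · exact not_lt.mp hx
        · intro i h hi; rw [getElem_snoc h, dif_pos (hi.trans hP)]; exact hfirst i (hi.trans hP) hi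
        · intro i h hle; rw [getElem_snoc h]; split_ifs with hj
          · exact hmin i hj hle
          · exact not_lt.mp hx2
        · intro i h hle hlt; rw [getElem_snoc h, dif_pos (hlt.trans hT)]; exact hminfirst i (hlt.trans hT) hle hlt

lemma index?_of_first {v : Int} (xs : List Int) (k : Nat) (hk : k < xs.length)
    (hv : xs[k] = v) (hlt : ∀ j : Nat, (h : j < xs.length) → j < k → xs[j] ≠ v) :
    PySem.List.index? xs v = some k := by
  rw [PySem.List.index?_eq_some_iff]
  refine ⟨xs.take k, xs.drop (k+1), ?_, ?_, ?_⟩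
  · conv_lhs => rw [← List.take_append_drop k xs]
    rw [List.drop_eq_getElem_cons hk, hv]
  · simp [List.length_take, Nat.min_eq_left (Nat.le_of_lt hk)]
  · intro hmem
    obtain ⟨j, hj, hjv⟩ := List.mem_iff_getElem.mp hmem
    have hjk : j < k := by simp [List.length_take] at hj; omega
    have hjlen : j < xs.length := Nat.lt_trans hjk hk
    have : xs[j] = v := by simpa [List.getElem_take] using hjv
    exact hlt j hjlen hjk this

lemma findIdx?_congr {α : Type} (p q : α → Bool) (l : List α) (h : ∀ x ∈ l, p x = q x) :
    l.findIdx? p = l.findIdx? q := by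
  induction l with
  | nil => rfl
  | cons a l ih =>
    simp only [List.findIdx?_cons]
    rw [h a (List.mem_cons_self), ih (fun x hx => h x (List.mem_cons_of_mem _ hx))]

lemma find?_pyRange_pyGetD (l : List Int) (q : Int → Bool) (n : Nat) :
    ∀ a : Nat, l.length - a = n →
      ((PySem.List.pyRange (a : Int) (l.length : Int) 1).find? (fun idx => q (PySem.List.pyGetD l idx 0)))
        = ((l.drop a).findIdx? q).map (fun k => ((a : Int) + (k : Int))) := by
  induction n with
  | zero =>
    intro a ha
    have hle : l.length ≤ a := by omega
    rw [PySem.List.pyRange_one_eq_nil (by exact_mod_cast hle), List.drop_eq_nil_of_le hle]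
    rfl
  | succ n ih =>
    intro a ha
    have hlt : a < l.length := by omega
    rw [PySem.List.pyRange_one_cons (by exact_mod_cast hlt), List.drop_eq_getElem_cons hlt]
    rw [List.find?_cons, List.findIdx?_cons]
    rw [PySem.List.pyGetD_natCast]
    cases hq : q (l.getD a 0) with
    | true =>
      have : l.getD a 0 = l[a] := List.getD_eq_getElem l 0 hlt
      rw [this] at hq
      simp [hq]
    | false =>
      have : l.getD a 0 = l[a] := List.getD_eq_getElem l 0 hlt
      rw [this] at hq
      have hcast : ((a : Int) + 1) = ((a + 1 : Nat) : Int) := by push_cast; ring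
      rw [hcast, ih (a + 1) (by omega)]
      simp only [hq, Bool.false_eq_true, if_false]
      cases (l.drop (a + 1)).findIdx? q with
      | none => rfl
      | some k => simp; ring

-- ===== VERDICT (by name: the statement is the Claim_ definition above) =====
lemma main_eq (prices : List Int) :
    recovery_days_after_drawdown prices = recovery_days_after_drawdown_alt prices := by
  by_cases hlen : prices.length < 3
  · unfold recovery_days_after_drawdown recovery_days_after_drawdown_alt
    rw [if_pos (Or.inr hlen), if_pos hlen]
  · obtain ⟨p0, rest, rfl⟩ : ∃ p0 rest, prices = p0 :: rest := by
      cases prices with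
      | nil => simp at hlen
      | cons a l => exact ⟨a, l, rfl⟩
    obtain ⟨M, t, P, T, hfold, hP, hT, hPT, hmax, ⟨_, hPval⟩, hfirst, ⟨_, hTval⟩, hmin, hminfirst⟩ :=
      fold_spec p0 rest
    -- B's intermediate values
    have hne : (p0 :: rest) ≠ [] := by simp
    have hmaxsome : PySem.List.max? (p0 :: rest) (fun x => x) = some M := by
      cases hm : PySem.List.max? (p0 :: rest) (fun x => x) with
      | none => exact absurd ((PySem.List.max?_eq_none_iff _ _).mp hm) hne
      | some m =>
        have hmem := PySem.List.max?_mem hm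
        obtain ⟨j, hj, hjv⟩ := List.mem_iff_getElem.mp hmem
        have h1 : m ≤ M := hjv ▸ hmax j hj
        have h2 : M ≤ m := by
          have := PySem.List.max?_isMax hm ((p0 :: rest)[P]) (List.getElem_mem hP)
          simpa [hPval] using this
        rw [le_antisymm h1 h2]
    have hidxP : PySem.List.index? (p0 :: rest) M = some P :=
      index?_of_first _ P hP hPval (fun j hj hjP => ne_of_lt (hfirst j hj hjP))
    have hsliceP : PySem.List.slice (p0 :: rest) (some (P : Int)) none = (p0 :: rest).drop P :=
      PySem.List.slice_from_natCast ..
    have hdroplen : ((p0 :: rest).drop P).length = (p0 :: rest).length - P := by simp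
    have hTP' : T - P < ((p0 :: rest).drop P).length := by omega
    have hdropT : ((p0 :: rest).drop P)[T - P]'hTP' = t := by
      rw [List.getElem_drop]
      have : P + (T - P) = T := by omega
      simp_rw [this]; exact hTval
    have hminsome : PySem.List.min? ((p0 :: rest).drop P) (fun x => x) = some t := by
      cases hm : PySem.List.min? ((p0 :: rest).drop P) (fun x => x) with
      | none =>
        have := (PySem.List.min?_eq_none_iff _ _).mp hm
        rw [List.drop_eq_nil_iff] at this
        omega
      | some m =>
        have hmem := PySem.List.min?_mem hm
        obtain ⟨j, hj, hjv⟩ := List.mem_iff_getElem.mp hmem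
        rw [List.getElem_drop] at hjv
        have h1 : t ≤ m := hjv ▸ hmin (P + j) (by omega) (by omega)
        have h2 : m ≤ t := by
          have := PySem.List.min?_isMin hm (((p0 :: rest).drop P)[T - P]'hTP')
            (List.getElem_mem hTP')
          simpa [hdropT] using this
        rw [le_antisymm h2 h1]
    have hidxT : PySem.List.index? ((p0 :: rest).drop P) t = some (T - P) := by
      refine index?_of_first _ (T - P) hTP' hdropT ?_
      intro j hj hjT
      rw [List.getElem_drop]
      exact ne_of_gt (hminfirst (P + j) (by omega) (by omega) (by omega))
    have hcastT : (P : Int) + ((T - P : Nat) : Int) = (T : Int) := by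
      omega
    -- unfold both sides
    unfold recovery_days_after_drawdown recovery_days_after_drawdown_alt
    rw [if_neg (by have := hlen; simp at this ⊢; omega), if_neg hlen]
    simp only [hfold, hmaxsome, hidxP, hsliceP, hminsome, hidxT, hcastT]
    by_cases hTle : T ≤ P
    · rw [if_pos (by exact_mod_cast hTle), if_pos (by exact_mod_cast hTle)]
    · rw [if_neg (by exact_mod_cast hTle), if_neg (by exact_mod_cast hTle)]
      have hsliceT : PySem.List.slice (p0 :: rest) (some (T : Int)) none = (p0 :: rest).drop T :=
        PySem.List.slice_from_natCast ..
      rw [hsliceT]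
      have hfind := find?_pyRange_pyGetD (p0 :: rest) (fun v => decide (v ≥ M))
        ((p0 :: rest).length - T) T rfl
      rw [hfind]
      have hidx : PySem.List.index? ((p0 :: rest).drop T) M
          = ((p0 :: rest).drop T).findIdx? (fun v => decide (v ≥ M)) := by
        rw [PySem.List.index?_eq_idxOf?]
        show ((p0 :: rest).drop T).findIdx? (· == M) = _
        refine findIdx?_congr _ _ _ ?_
        intro v hv
        have hvle : v ≤ M := by
          obtain ⟨j, hj, hjv⟩ := List.mem_iff_getElem.mp hv
          rw [List.getElem_drop] at hjv
          rw [List.length_drop] at hj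
          exact hjv ▸ hmax (T + j) (by omega)
        by_cases hvM : v = M
        · subst hvM; simp
        · have hnle : ¬ M ≤ v := fun h => hvM (le_antisymm hvle h)
          simp [hvM, hnle]
      rw [hidx]
      cases ((p0 :: rest).drop T).findIdx? (fun v => decide (v ≥ M)) with
      | none => rfl
      | some k => simp

theorem recovery_days_after_drawdown_spec : Claim_equal_recovery_days_after_drawdown := by
  intro prices _
  exact main_eq prices
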